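-- pv_equiv track=rewrite | github.com/decoct-io/decoct | src/decoct/compression/archetypal.py | _count_consistent
-- ===== SOURCE A (Python) =====
-- from typing import Any
--
-- def _values_equal(a: Any, b: Any) -> bool:
--     """Type-sensitive equality.  True(bool) != 1(int) != 'true'(str)."""
--     return type(a) is type(b) and a == b  # noqa: E721
--
-- def _count_consistent(flat: dict[str, dict[str, Any]], hosts: list[str]) -> int:
--     """Count fields with identical type+value across *all* hosts."""
--     if len(hosts) < 2:
--         return sum(len(flat[h]) for h in hosts)
--
--     path_sets = [set(flat[h].keys()) for h in hosts]
--     shared = path_sets[0].copy()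
--     for ps in path_sets[1:]:
--         shared &= ps
--
--     count = 0
--     for path in shared:
--         ref = flat[hosts[0]][path]
--         if all(_values_equal(flat[h][path], ref) for h in hosts[1:]):
--             count += 1
--     return count
-- ===== SOURCE B (Python) =====
-- from typing import Any
--
-- def _values_equal(a: Any, b: Any) -> bool:
--     """Type-sensitive equality.  True(bool) != 1(int) != 'true'(str)."""
--     return type(a) is type(b) and a == b  # noqa: E721
--
-- def _count_consistent(flat: dict[str, dict[str, Any]], hosts: list[str]) -> int:
--     """Count fields with identical type+value across *all* hosts,
--     by shrinking a running candidate dict instead of intersecting key sets."""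
--     if len(hosts) < 2:
--         return sum(len(flat[h]) for h in hosts)
--     h0, *rest = hosts
--     cand = dict(flat[h0])
--     for h in rest:
--         d = flat[h]
--         cand = {p: v for p, v in cand.items() if p in d and _values_equal(d[p], v)}
--     return len(cand)
-- ===== Notes on version B (the rewrite author's own statement) =====
-- stated objective: alternative
-- what changed: B drops A's key-set-intersection pass and per-path all() rescan; it instead threads one shrinking candidate dict seeded from the first host and filtered once per remaining host.
import Mathlib
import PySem

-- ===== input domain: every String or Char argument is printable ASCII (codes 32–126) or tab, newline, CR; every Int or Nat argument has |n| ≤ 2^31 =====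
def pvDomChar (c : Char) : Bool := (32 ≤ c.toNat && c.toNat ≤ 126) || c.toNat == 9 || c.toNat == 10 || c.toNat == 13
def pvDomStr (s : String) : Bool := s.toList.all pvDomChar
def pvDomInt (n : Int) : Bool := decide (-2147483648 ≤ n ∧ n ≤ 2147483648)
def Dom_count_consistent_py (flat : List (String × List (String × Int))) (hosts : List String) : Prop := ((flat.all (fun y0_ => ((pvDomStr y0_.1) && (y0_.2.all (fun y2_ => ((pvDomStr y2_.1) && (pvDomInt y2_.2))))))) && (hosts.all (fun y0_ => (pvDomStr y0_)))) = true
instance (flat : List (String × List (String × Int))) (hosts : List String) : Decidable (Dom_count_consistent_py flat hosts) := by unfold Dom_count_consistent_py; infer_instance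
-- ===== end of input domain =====

-- B replaces A's key-set-intersection pass plus per-path all() scan by one shrinking candidate dict
-- filtered once per host (objective: alternative decomposition, same asymptotic cost).

-- Shared dict primitives (Python dict access on the assoc-list representation; first match).
def pvLookup : List (String × Int) → String → Option Int
  | [], _ => none
  | (k, v) :: t, x => if k == x then some v else pvLookup t x

-- flat[h]; Python raises KeyError when h is absent — those inputs are excluded by Pre_ below.
def pvOuter : List (String × List (String × Int)) → String → List (String × Int)
  | [], _ => []
  | (k, d) :: t, x => if k == x then d else pvOuter t x

-- ===== PORT A =====
-- _values_equal: here both values are ints, so the type(a) is type(b) test always passes.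
def pvValuesEqual (a b : Int) : Bool := a == b

def count_consistent_py (flat : List (String × List (String × Int))) (hosts : List String) : Int :=
  if hosts.length < 2 then
    hosts.foldl (fun acc h => acc + ((pvOuter flat h).length : Int)) 0
  else
    let pathSets : List (PySem.Set String) :=
      hosts.map (fun h => PySem.Set.ofList ((pvOuter flat h).map (·.1)))
    let shared := pathSets.tail.foldl (fun sh ps => PySem.Set.inter sh ps)
      (pathSets.headD PySem.Set.empty)
    shared.foldl (fun count path =>
      let ref := (pvLookup (pvOuter flat (hosts.headD "")) path).getD 0
      if hosts.tail.all (fun h => pvValuesEqual ((pvLookup (pvOuter flat h) path).getD 0) ref)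
      then count + 1 else count) 0

-- ===== PORT B =====
def count_consistent_py_alt (flat : List (String × List (String × Int))) (hosts : List String) : Int :=
  match hosts with
  | [] => 0
  | [h] => ((pvOuter flat h).length : Int)
  | h0 :: rest =>
    let cand := rest.foldl (fun cand h =>
      cand.filter (fun pv => pvLookup (pvOuter flat h) pv.1 == some pv.2)) (pvOuter flat h0)
    (cand.length : Int)

-- ===== PRECONDITION & SPEC =====
-- Pre_ excludes hosts absent from flat (Python A raises KeyError there) and assoc lists with
-- duplicate keys, which do not represent any Python dict under the type convention.
def Pre_count_consistent_py (flat : List (String × List (String × Int))) (hosts : List String) : Prop :=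
  (∀ h ∈ hosts, h ∈ flat.map (·.1)) ∧ (flat.map (·.1)).Nodup ∧ ∀ p ∈ flat, (p.2.map (·.1)).Nodup
instance (flat : List (String × List (String × Int))) (hosts : List String) : Decidable (Pre_count_consistent_py flat hosts) := by unfold Pre_count_consistent_py; infer_instance

def pvWitness_count_consistent_py : (List (String × List (String × Int))) × List String :=
  ([("h1", [("a", 1), ("b", 2)]), ("h2", [("a", 1)])], ["h1", "h2"])

def Spec_count_consistent_py (flat : List (String × List (String × Int))) (hosts : List String) (out : Int) : Prop := out = count_consistent_py_alt flat hosts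
instance (flat : List (String × List (String × Int))) (hosts : List String) (out : Int) : Decidable (Spec_count_consistent_py flat hosts out) := by unfold Spec_count_consistent_py; infer_instance

-- ===== CLAIM (what is proved, stated in full; the proofs are below) =====
def Claim_equal_count_consistent_py : Prop := ∀ (flat : List (String × List (String × Int))) (hosts : List String), Dom_count_consistent_py flat hosts → Pre_count_consistent_py flat hosts → Spec_count_consistent_py flat hosts (count_consistent_py flat hosts)

-- ===== LEMMAS AND PROOFS =====

-- a fold of filters is one filter by the conjunction of the tests
theorem pv_foldl_filter {α β : Type} (q : β → α → Bool) (ts : List β) :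
    ∀ (d : List α), ts.foldl (fun c h => c.filter (q h)) d
      = d.filter (fun x => ts.all (fun h => q h x)) := by
  induction ts with
  | nil => intro d; simp
  | cons t ts ih =>
    intro d
    rw [List.foldl_cons, ih, List.filter_filter]
    exact List.filter_congr (fun x _ => by simp [List.all_cons, Bool.and_comm])

theorem pv_contains_eq_isSome (d : List (String × Int)) (p : String) :
    (d.map (·.1)).contains p = (pvLookup d p).isSome := by
  induction d with
  | nil => rfl
  | cons kv t ih =>
    obtain ⟨k, v⟩ := kv
    simp only [pvLookup, List.map_cons, List.contains_cons]
    by_cases h : k = p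
    · subst h; simp
    · have hpk : (p == k) = false := beq_eq_false_iff_ne.mpr (Ne.symm h)
      simpa [hpk, h] using ih

theorem pv_lookup_of_mem (d : List (String × Int)) (k : String) (v : Int)
    (hnd : (d.map (·.1)).Nodup) (hm : (k, v) ∈ d) : pvLookup d k = some v := by
  induction d with
  | nil => cases hm
  | cons kv t ih =>
    obtain ⟨k', v'⟩ := kv
    simp only [List.map_cons, List.nodup_cons] at hnd
    simp only [pvLookup]
    by_cases h : k' = k
    · subst h
      rcases List.mem_cons.mp hm with he | he
      · injection he with h1 h2; subst h2; simp
      · exact absurd (List.mem_map.mpr ⟨(k', v), he, rfl⟩) hnd.1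
    · rcases List.mem_cons.mp hm with he | he
      · exact absurd (congrArg Prod.fst he).symm h
      · simp only [beq_iff_eq, if_neg h]
        exact ih hnd.2 he

theorem pv_outer_nodup (flat : List (String × List (String × Int))) (h : String)
    (hnd : ∀ p ∈ flat, (p.2.map (·.1)).Nodup) : ((pvOuter flat h).map (·.1)).Nodup := by
  induction flat with
  | nil => simp [pvOuter]
  | cons kd t ih =>
    obtain ⟨k, d⟩ := kd
    simp only [pvOuter]
    split
    · exact hnd (k, d) (List.mem_cons_self ..)
    · exact ih (fun p hp => hnd p (List.mem_cons_of_mem _ hp))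

theorem pv_contains_ofList (xs : List String) (y : String) :
    (PySem.Set.ofList xs).contains y = xs.contains y := by
  simp [PySem.Set.contains, PySem.Set.mem_ofList]

-- ===== VERDICT (by name: the statement is the Claim_ definition above) =====
theorem count_consistent_py_spec : Claim_equal_count_consistent_py := by
  intro flat hosts _ hpre
  unfold Spec_count_consistent_py
  obtain ⟨-, -, hndI⟩ := hpre
  match hosts with
  | [] => simp [count_consistent_py, count_consistent_py_alt]
  | [h] => simp [count_consistent_py, count_consistent_py_alt]
  | h0 :: h1 :: rest =>
    have hlen : ¬ ((h0 :: h1 :: rest : List String).length < 2) := by simp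
    have hd0 : ((pvOuter flat h0).map (·.1)).Nodup := pv_outer_nodup flat h0 hndI
    simp only [count_consistent_py, count_consistent_py_alt, if_neg hlen]
    set tl : List String := h1 :: rest with htl
    simp only [List.map_cons, List.tail_cons, List.headD_cons]
    rw [show (fun (sh ps : PySem.Set String) => PySem.Set.inter sh ps)
        = (fun sh ps => List.filter (fun x => PySem.Set.contains ps x) sh) from rfl]
    rw [pv_foldl_filter, pv_foldl_filter]
    refine Eq.trans (PySem.List.foldl_if_add_one _ _ 0) ?_
    rw [zero_add]
    rw [List.countP_filter, ← List.countP_eq_length_filter,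
      PySem.Set.ofList_eq_self_of_nodup _ hd0, List.countP_map]
    refine congrArg _ (List.countP_congr fun pv hpv => ?_)
    obtain ⟨p, v⟩ := pv
    have href : pvLookup (pvOuter flat h0) p = some v := pv_lookup_of_mem _ _ _ hd0 hpv
    simp only [Function.comp_apply, Function.comp_def, href, Option.getD_some, List.all_map,
      pv_contains_ofList, pv_contains_eq_isSome]
    simp only [Bool.and_eq_true, List.all_eq_true]
    constructor
    · rintro ⟨he, hc⟩ h hh
      have h1 := he h hh
      have h2 := hc h hh
      cases hlu : pvLookup (pvOuter flat h) p with
      | none => rw [hlu] at h2; cases h2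
      | some w =>
        rw [hlu] at h1
        simp only [pvValuesEqual, Option.getD_some, beq_iff_eq] at h1
        simp [h1]
    · intro hb
      refine ⟨fun h hh => ?_, fun h hh => ?_⟩
      · have hbh := hb h hh
        cases hlu : pvLookup (pvOuter flat h) p with
        | none => rw [hlu] at hbh; cases hbh
        | some w =>
          rw [hlu] at hbh
          simp only [Option.some.injEq, beq_iff_eq] at hbh
          simp [pvValuesEqual, hbh]
      · have hbh := hb h hh
        cases hlu : pvLookup (pvOuter flat h) p with
        | none => rw [hlu] at hbh; cases hbh
        | some w => rfl
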